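-- pv_equiv track=rewrite | github.com/pypi-data/pypi-mirror-175 | packages/metapack-wp/metapack-wp-0.0.18.tar.gz/metapack-wp-0.0.18/src/metapack_wp/wp.py | split_groups_tags
-- ===== SOURCE A (Python) =====
-- def split_groups_tags(v):
--     if not v:
--         return
--
--     for g in v:
--         if ',' in g:
--             for g_ in g.split(','):
--                 yield g_
--         else:
--             yield g
-- ===== SOURCE B (Python) =====
-- def split_groups_tags(v):
--     if not v:
--         return
--     yield from ','.join(v).split(',')
-- ===== Notes on version B (the rewrite author's own statement) =====
-- stated objective: simpler
-- what changed: Replaces the per-element loop with its comma test and per-element split by a single join-then-split pass over the whole list (','.join(v).split(',')), keeping the empty-input guard.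
import Mathlib
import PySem

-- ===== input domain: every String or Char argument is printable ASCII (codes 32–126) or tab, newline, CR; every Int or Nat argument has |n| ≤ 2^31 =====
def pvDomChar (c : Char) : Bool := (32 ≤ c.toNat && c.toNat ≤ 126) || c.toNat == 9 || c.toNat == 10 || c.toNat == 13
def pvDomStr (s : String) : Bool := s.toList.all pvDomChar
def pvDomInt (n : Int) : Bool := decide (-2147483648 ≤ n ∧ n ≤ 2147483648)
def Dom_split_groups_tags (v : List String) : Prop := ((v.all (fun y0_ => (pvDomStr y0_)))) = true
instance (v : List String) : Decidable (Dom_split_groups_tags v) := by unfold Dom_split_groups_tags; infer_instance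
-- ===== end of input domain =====

-- B replaces the per-element comma-test-and-split loop by a single join-then-split pass; objective: simpler.


-- ===== PORT A =====
-- generator ported as the list of yielded values; 'if not v: return' → empty result on []
def split_groups_tags (v : List String) : List String :=
  if v.isEmpty then []
  else
    v.foldl (fun acc g =>
      if PySem.Str.isIn "," g then acc ++ (PySem.Str.split? g ",").getD []
      else acc ++ [g]) []

-- ===== PORT B =====
def split_groups_tags_alt (v : List String) : List String :=
  if v.isEmpty then []
  else (PySem.Str.split? (PySem.Str.join "," v) ",").getD []

-- ===== PRECONDITION & SPEC =====
def Spec_split_groups_tags (v : List String) (out : List String) : Prop := out = split_groups_tags_alt v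
instance (v : List String) (out : List String) : Decidable (Spec_split_groups_tags v out) := by unfold Spec_split_groups_tags; infer_instance

-- ===== CLAIM (what is proved, stated in full; the proofs are below) =====
def Claim_equal_split_groups_tags : Prop := ∀ (v : List String), Dom_split_groups_tags v → Spec_split_groups_tags v (split_groups_tags v)

-- ===== LEMMAS AND PROOFS =====

-- simple structural recursion equivalent to splitting on ','
def pvSpl : List Char → List (List Char)
  | [] => [[]]
  | c :: rest => if c = ',' then [] :: pvSpl rest else (pvSpl rest).modifyHead (c :: ·)

theorem pvSpl_ne_nil (l : List Char) : pvSpl l ≠ [] := by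
  cases l with
  | nil => simp [pvSpl]
  | cons c rest =>
    simp only [pvSpl]
    split
    · simp
    · cases h : pvSpl rest with
      | nil => exact absurd h (pvSpl_ne_nil rest)
      | cons a t => simp [List.modifyHead]

theorem pvGo_eq (l : List Char) : ∀ (fuel : Nat) (cur : List Char) (acc : List (List Char)),
    l.length ≤ fuel →
    PySem.Chars.splitOn.go [','] fuel l cur acc
      = acc.reverse ++ (pvSpl l).modifyHead (cur.reverse ++ ·) := by
  induction l with
  | nil =>
    intro fuel cur acc _
    cases fuel <;> simp [PySem.Chars.splitOn.go, pvSpl]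
  | cons c rest ih =>
    intro fuel cur acc hf
    cases fuel with
    | zero => simp at hf
    | succ fuel =>
      by_cases hc : c = ','
      · subst hc
        have hpre : List.isPrefixOf [','] (',' :: rest) = true := by
          simp [List.isPrefixOf]
        rw [PySem.Chars.splitOn.go]
        simp only [hpre, if_true, List.length_cons] at *
        rw [show List.drop ([].length + 1) (',' :: rest) = rest from rfl]
        rw [ih fuel [] (cur.reverse :: acc) (by omega)]
        simp [pvSpl]
        cases h : pvSpl rest with
        | nil => exact absurd h (pvSpl_ne_nil rest)
        | cons a t => simp [List.modifyHead]
      · have hpre : List.isPrefixOf [','] (c :: rest) = false := by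
          simp [List.isPrefixOf]
          intro h; exact absurd h.symm hc
        rw [PySem.Chars.splitOn.go]
        simp only [hpre, Bool.false_eq_true, if_false]
        rw [ih fuel (c :: cur) acc (by simpa using Nat.le_of_succ_le_succ hf)]
        simp only [pvSpl, hc, if_false]
        cases h : pvSpl rest with
        | nil => exact absurd h (pvSpl_ne_nil rest)
        | cons a t => simp [List.modifyHead]

theorem pvSplitOn_comma (s : List Char) : PySem.Chars.splitOn s [','] = pvSpl s := by
  rw [PySem.Chars.splitOn, pvGo_eq s (s.length + 1) [] [] (by omega)]
  cases h : pvSpl s with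
  | nil => exact absurd h (pvSpl_ne_nil s)
  | cons a t => simp [List.modifyHead]

theorem pvSpl_no_comma (s : List Char) (h : ',' ∉ s) : pvSpl s = [s] := by
  induction s with
  | nil => simp [pvSpl]
  | cons c rest ih =>
    simp only [List.mem_cons, not_or] at h
    simp [pvSpl, Ne.symm h.1, ih h.2, List.modifyHead]

theorem pvSpl_append (xs ys : List Char) :
    pvSpl (xs ++ ',' :: ys) = pvSpl xs ++ pvSpl ys := by
  induction xs with
  | nil => simp [pvSpl]
  | cons c xs ih =>
    by_cases hc : c = ','
    · subst hc; simp [pvSpl, ih]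
    · simp only [List.cons_append, pvSpl, hc, if_false, ih]
      cases h : pvSpl xs with
      | nil => exact absurd h (pvSpl_ne_nil xs)
      | cons a t => simp [List.modifyHead]

theorem pvSpl_join (L : List (List Char)) (h : L ≠ []) :
    pvSpl (PySem.Chars.join [','] L) = L.flatMap pvSpl := by
  induction L with
  | nil => exact absurd rfl h
  | cons g rest ih =>
    cases rest with
    | nil => simp [PySem.Chars.join_singleton]
    | cons h2 t =>
      rw [PySem.Chars.join_cons_cons]
      rw [show g ++ [','] ++ PySem.Chars.join [','] (h2 :: t)
            = g ++ ',' :: PySem.Chars.join [','] (h2 :: t) by simp]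
      rw [pvSpl_append, ih (by simp)]
      simp

-- the Str-level split by "," maps (via toList) onto pvSpl
theorem pvSplit_toList (s : String) :
    ((PySem.Str.split? s ",").getD []).map String.toList = pvSpl s.toList := by
  have h := PySem.Str.split?_map s ","
  rw [show (",".toList : List Char) = [','] from rfl] at h
  rw [PySem.Chars.split?] at h
  simp only [List.isEmpty_cons, Bool.false_eq_true, if_false] at h
  cases hs : PySem.Str.split? s "," with
  | none => rw [hs] at h; simp at h
  | some y =>
    rw [hs] at h
    simp only [Option.map_some, Option.some.injEq] at h
    simp [h, pvSplitOn_comma]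

theorem pvNoComma_of_isIn_false (g : String) (h : PySem.Str.isIn "," g = false) :
    ',' ∉ g.toList := by
  intro hm
  obtain ⟨s, t, hst⟩ := List.append_of_mem hm
  have : PySem.Str.isIn "," g = true := by
    rw [PySem.Str.isIn_iff_infix]
    exact ⟨s, t, by simp [hst]⟩
  rw [h] at this; exact absurd this (by simp)

-- ===== VERDICT (by name: the statement is the Claim_ definition above) =====
theorem split_groups_tags_spec : Claim_equal_split_groups_tags := by
  intro v _
  unfold Spec_split_groups_tags split_groups_tags split_groups_tags_alt
  cases hv : v.isEmpty with
  | true => simp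
  | false =>
    simp only [Bool.false_eq_true, if_false]
    have hne : v ≠ [] := by simpa [List.isEmpty_iff] using hv
    apply List.map_injective_iff.mpr (fun a b => String.toList_inj.mp)
    -- A side
    have hA : (v.foldl (fun acc g =>
        if PySem.Str.isIn "," g then acc ++ (PySem.Str.split? g ",").getD []
        else acc ++ [g]) []).map String.toList
        = (v.map String.toList).flatMap pvSpl := by
      have hfold : (v.foldl (fun acc g =>
          if PySem.Str.isIn "," g then acc ++ (PySem.Str.split? g ",").getD []
          else acc ++ [g]) [])
          = v.foldl (fun acc g =>
              acc ++ (if PySem.Str.isIn "," g then (PySem.Str.split? g ",").getD []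
                      else [g])) [] := by
        apply PySem.List.foldl_congr_mem
        intro acc g _
        split <;> rfl
      rw [hfold, PySem.List.foldl_append_eq_flatMap]
      simp only [List.nil_append, List.map_flatMap, List.flatMap_map]
      apply List.flatMap_congr
      intro g _
      cases h : PySem.Str.isIn "," g with
      | true => simpa [h] using pvSplit_toList g
      | false =>
        simp only [Bool.false_eq_true, if_false, List.map_cons, List.map_nil]
        rw [pvSpl_no_comma g.toList (pvNoComma_of_isIn_false g h)]
    -- B side
    have hB : (((PySem.Str.split? (PySem.Str.join "," v) ",").getD []).map String.toList)
        = (v.map String.toList).flatMap pvSpl := by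
      rw [pvSplit_toList, PySem.Str.toList_join,
        show (",".toList : List Char) = [','] from rfl]
      exact pvSpl_join _ (by simpa using hne)
    rw [hA, hB]
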